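-- pv_equiv track=rewrite | github.com/sakshamsingh1/ltx_lora_training_i2v_t2v | audio_helpers/dataset_audio.py | calc_index_for_multi_datasets
-- ===== SOURCE A (Python) =====
-- def calc_index_for_multi_datasets(list_of_datasets):
--     dataset_indices = []
--     idxAccumulate = 0
--     for dd in list_of_datasets:
--         idxrange = [idxAccumulate + ii for ii in range(len(dd))]
--         dataset_indices.append(idxrange)
--         idxAccumulate += len(dd)
--     return dataset_indices
-- ===== SOURCE B (Python) =====
-- def calc_index_for_multi_datasets(list_of_datasets):
--     # Build the single global flat index list once, then partition it:
--     # each dataset takes the next len(dd)-sized slice off the front.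
--     flat = list(range(sum(map(len, list_of_datasets))))
--     dataset_indices = []
--     for dd in list_of_datasets:
--         k = len(dd)
--         dataset_indices.append(flat[:k])
--         flat = flat[k:]
--     return dataset_indices
-- ===== Notes on version B (the rewrite author's own statement) =====
-- stated objective: alternative
-- what changed: B never computes any index arithmetically: it materializes the one global flat index list range(total) and then partitions it into the per-dataset blocks by slicing a chunk of each dataset's length off the front, replacing A's running-offset accumulator and per-element comprehension.
import Mathlib
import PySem

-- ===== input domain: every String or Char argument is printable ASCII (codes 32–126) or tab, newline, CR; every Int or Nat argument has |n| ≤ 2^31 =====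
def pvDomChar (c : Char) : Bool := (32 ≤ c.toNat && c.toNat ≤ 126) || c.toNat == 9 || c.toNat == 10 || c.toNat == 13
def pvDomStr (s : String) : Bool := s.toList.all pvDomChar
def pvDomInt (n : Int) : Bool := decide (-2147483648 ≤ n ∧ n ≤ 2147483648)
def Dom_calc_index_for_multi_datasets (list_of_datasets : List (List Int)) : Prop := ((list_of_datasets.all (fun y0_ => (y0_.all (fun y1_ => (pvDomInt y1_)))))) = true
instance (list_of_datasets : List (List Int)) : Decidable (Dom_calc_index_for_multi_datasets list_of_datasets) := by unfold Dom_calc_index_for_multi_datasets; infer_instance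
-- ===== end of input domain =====

-- B materializes the one global flat index list range(total) and partitions it by
-- slicing per-dataset chunks off the front, instead of A's running-offset accumulator
-- with a per-element comprehension; objective: alternative (same asymptotic cost).

-- ===== PORT A =====
-- for dd: idxrange = [idxAccumulate + ii for ii in range(len(dd))]; append; idxAccumulate += len(dd)
def calc_index_for_multi_datasets (list_of_datasets : List (List Int)) : List (List Int) :=
  (list_of_datasets.foldl
    (fun (st : List (List Int) × Int) dd =>
      (st.1 ++ [(List.range dd.length).map (fun (ii : Nat) => st.2 + (ii : Int))],
       st.2 + (dd.length : Int)))
    ([], 0)).1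

-- ===== PORT B =====
-- flat = list(range(sum(map(len, …)))); then per dataset: append flat[:k]; flat = flat[k:]
-- (flat[:k] / flat[k:] with the nonnegative k = len(dd) are exactly List.take / List.drop)
def calc_index_for_multi_datasets_alt (list_of_datasets : List (List Int)) : List (List Int) :=
  let total : Nat := list_of_datasets.foldl (fun s dd => s + dd.length) 0
  let flat : List Int := (List.range total).map (fun (i : Nat) => (i : Int))
  (list_of_datasets.foldl
    (fun (st : List (List Int) × List Int) dd =>
      (st.1 ++ [st.2.take dd.length], st.2.drop dd.length))
    ([], flat)).1

-- ===== PRECONDITION & SPEC =====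
def Spec_calc_index_for_multi_datasets (list_of_datasets : List (List Int)) (out : List (List Int)) : Prop := out = calc_index_for_multi_datasets_alt list_of_datasets
instance (list_of_datasets : List (List Int)) (out : List (List Int)) : Decidable (Spec_calc_index_for_multi_datasets list_of_datasets out) := by unfold Spec_calc_index_for_multi_datasets; infer_instance

-- ===== CLAIM (what is proved, stated in full; the proofs are below) =====
def Claim_equal_calc_index_for_multi_datasets : Prop := ∀ (list_of_datasets : List (List Int)), Dom_calc_index_for_multi_datasets list_of_datasets → Spec_calc_index_for_multi_datasets list_of_datasets (calc_index_for_multi_datasets list_of_datasets)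

-- ===== LEMMAS AND PROOFS =====

-- proof-only reference: the blocks of consecutive indices, starting at offset `off`
def pvBlocks : Int → List (List Int) → List (List Int)
  | _, [] => []
  | off, dd :: t =>
    ((List.range dd.length).map (fun (ii : Nat) => off + (ii : Int))) :: pvBlocks (off + (dd.length : Int)) t

lemma a_fold_eq_blocks (l : List (List Int)) (acc : List (List Int)) (idx : Int) :
    (l.foldl
      (fun (st : List (List Int) × Int) dd =>
        (st.1 ++ [(List.range dd.length).map (fun (ii : Nat) => st.2 + (ii : Int))],
         st.2 + (dd.length : Int)))
      (acc, idx)).1 = acc ++ pvBlocks idx l := by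
  induction l generalizing acc idx with
  | nil => simp [pvBlocks]
  | cons dd t ih =>
    simp only [List.foldl_cons]
    rw [ih]
    simp [pvBlocks]

lemma sum_len_foldl (l : List (List Int)) (s : Nat) :
    l.foldl (fun a dd => a + dd.length) s = s + (l.map List.length).sum := by
  induction l generalizing s with
  | nil => simp
  | cons dd t ih => simp [List.foldl_cons, ih]; omega

lemma drop_range' (n k : Nat) : (List.range n).drop k = (List.range (n - k)).map (fun i => i + k) := by
  apply List.ext_getElem
  · simp
  · intro i h1 h2
    simp [List.getElem_drop]
    omega

-- the flat list is a shifted range-suffix: take is one block, drop is the next suffix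
lemma b_fold_eq_blocks (l : List (List Int)) (acc : List (List Int)) (off m : Nat)
    (hm : m = l.foldl (fun s dd => s + dd.length) 0) :
    (l.foldl
      (fun (st : List (List Int) × List Int) dd =>
        (st.1 ++ [st.2.take dd.length], st.2.drop dd.length))
      (acc, (List.range m).map (fun i => ((off + i : Nat) : Int)))).1
    = acc ++ pvBlocks (off : Int) l := by
  induction l generalizing acc off m with
  | nil => simp [pvBlocks]
  | cons dd t ih =>
    have hsum : m = dd.length + (t.map List.length).sum := by
      rw [hm, sum_len_foldl]; simp
    have hle : dd.length ≤ m := by omega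
    have htake : ((List.range m).map (fun i => ((off + i : Nat) : Int))).take dd.length
        = (List.range dd.length).map (fun (ii : Nat) => (off : Int) + (ii : Int)) := by
      rw [← List.map_take, List.take_range, min_eq_left hle]
      apply List.map_congr_left; intro i _; push_cast; ring
    have hdrop : ((List.range m).map (fun i => ((off + i : Nat) : Int))).drop dd.length
        = (List.range (m - dd.length)).map (fun i => ((off + dd.length + i : Nat) : Int)) := by
      rw [← List.map_drop, drop_range', List.map_map]
      apply List.map_congr_left; intro i _
      simp [Function.comp]; ring
    have hm' : m - dd.length = t.foldl (fun s dd => s + dd.length) 0 := by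
      rw [sum_len_foldl]; omega
    simp only [List.foldl_cons, htake, hdrop]
    rw [ih (acc ++ [(List.range dd.length).map (fun (ii : Nat) => (off : Int) + (ii : Int))])
        (off + dd.length) (m - dd.length) hm']
    simp [pvBlocks]

-- ===== VERDICT (by name: the statement is the Claim_ definition above) =====
theorem calc_index_for_multi_datasets_spec : Claim_equal_calc_index_for_multi_datasets := by
  intro l _
  show calc_index_for_multi_datasets l = calc_index_for_multi_datasets_alt l
  unfold calc_index_for_multi_datasets calc_index_for_multi_datasets_alt
  rw [a_fold_eq_blocks l [] 0]
  have h := b_fold_eq_blocks l [] 0 (l.foldl (fun s dd => s + dd.length) 0) rfl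
  simp only [Nat.zero_add, Nat.cast_zero] at h ⊢
  rw [← h]
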